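-- pv_equiv track=rewrite | github.com/cts43/ARGamifiedDrums | Data Analysis/main.py | matchHits
-- ===== SOURCE A (Python) =====
-- def matchHits(hits,referenceHits):
--     #slow but functional. iterate through notes and pair them to their closest reference, removing any extraneous ones
--     hitWindow = 300
--     toReturn = []
--     for ref in referenceHits:
--         currentMatch = None
--         currentIdx = None
--         currentDiff = None
--         for i,hit in enumerate(hits):
--             diff = abs(hit-ref)
--             if diff <= hitWindow and (currentMatch is None or diff < currentDiff):
--                 currentMatch = hit
--                 currentIdx = i
--                 currentDiff = diff
--         if currentMatch is not None:
--             toReturn.append((currentMatch,ref))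
--             hits.pop(currentIdx)
--
--     if toReturn:
--         hits,referenceHits = zip(*toReturn)
--         return list(hits),list(referenceHits)
--     else: return [],[]
-- ===== SOURCE B (Python) =====
-- def _bisect_left(rem, x):
--     # first position whose stored value is >= x (rem sorted by value)
--     lo, hi = 0, len(rem)
--     while lo < hi:
--         mid = (lo + hi) // 2
--         if rem[mid][0] < x:
--             lo = mid + 1
--         else:
--             hi = mid
--     return lo
--
-- def matchHits(hits, referenceHits):
--     hitWindow = 300
--     # remaining hits as (value, original index), sorted; binary search per reference
--     rem = sorted((h, i) for i, h in enumerate(hits))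
--     outHits, outRefs = [], []
--     for ref in referenceHits:
--         lo = _bisect_left(rem, ref)
--         best = None  # (diff, original index, position in rem)
--         if lo < len(rem):
--             v, idx = rem[lo]
--             if v - ref <= hitWindow:
--                 best = (v - ref, idx, lo)
--         if lo > 0:
--             v = rem[lo - 1][0]
--             j = _bisect_left(rem, v)
--             idx = rem[j][1]
--             if ref - v <= hitWindow and (best is None or (ref - v, idx) < (best[0], best[1])):
--                 best = (ref - v, idx, j)
--         if best is not None:
--             outHits.append(rem[best[2]][0])
--             outRefs.append(ref)
--             rem.pop(best[2])
--     return outHits, outRefs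
-- ===== Notes on version B (the rewrite author's own statement) =====
-- stated objective: faster
-- what changed: Replaces the per-reference linear scan over all remaining hits with a sorted (value, original-index) list and binary search for the two nearest neighbours, deleting the matched entry; greedy order and tie-breaking (smallest diff, then earliest original position) are preserved exactly.
import Mathlib
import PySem

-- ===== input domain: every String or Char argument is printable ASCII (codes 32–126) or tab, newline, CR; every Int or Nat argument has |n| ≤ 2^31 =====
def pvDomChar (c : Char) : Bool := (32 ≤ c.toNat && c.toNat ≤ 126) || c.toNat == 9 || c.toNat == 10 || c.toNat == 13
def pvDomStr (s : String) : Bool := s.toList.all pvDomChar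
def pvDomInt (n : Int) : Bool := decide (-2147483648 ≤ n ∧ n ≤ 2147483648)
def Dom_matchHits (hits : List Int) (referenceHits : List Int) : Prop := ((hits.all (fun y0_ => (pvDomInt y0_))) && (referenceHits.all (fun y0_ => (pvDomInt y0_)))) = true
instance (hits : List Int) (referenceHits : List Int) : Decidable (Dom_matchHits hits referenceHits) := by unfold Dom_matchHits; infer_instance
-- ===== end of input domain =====

-- B replaces A's per-reference linear scan with a sorted (value, original-index) list and
-- hand-written binary search for the two nearest remaining hits (objective: faster).
-- A mutates its `hits` argument in place (pops matched hits); B does not. The equivalence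
-- proved here is about the RETURN value only.

-- ===== PORT A =====
-- inner 'for i,hit in enumerate(hits)' loop: state (currentMatch, currentIdx, currentDiff)
def aScan (ref : Int) (hs : List Int) : Option Int × Option Int × Option Int :=
  (PySem.List.enumerate hs).foldl
    (fun (c : Option Int × Option Int × Option Int) p =>
      let diff := |p.2 - ref|
      if diff ≤ 300 ∧ (c.1 = none ∨ diff < c.2.2.getD 0) then (some p.2, some p.1, some diff)
      else c)
    (none, none, none)

-- one iteration of the 'for ref in referenceHits' loop: state (hits, toReturn)
def aStep (ref : Int) (st : List Int × List (Int × Int)) : List Int × List (Int × Int) :=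
  let c := aScan ref st.1
  match c.1, c.2.1 with
  | some m, some i =>
    match PySem.List.pop? st.1 i with
    | some r => (r.2, st.2 ++ [(m, ref)])
    | none => (st.1, st.2 ++ [(m, ref)])   -- unreachable: i is always a valid index
  | _, _ => st

def matchHits (hits : List Int) (referenceHits : List Int) : List Int × List Int :=
  let st := referenceHits.foldl (fun st ref => aStep ref st) (hits, ([] : List (Int × Int)))
  if st.2 ≠ [] then (st.2.map Prod.fst, st.2.map Prod.snd) else ([], [])

-- ===== PORT B =====
-- hand-written _bisect_left from Source B: first position in rem (sorted by stored value) with value ≥ x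
-- fuel makes the loop structural; fuel = rem.length always suffices since hi - lo shrinks
def bisectGo (rem : List (Int × Int)) (x : Int) : Nat → Nat → Nat → Nat
  | 0, lo, _ => lo
  | fuel + 1, lo, hi =>
    if lo < hi then
      let mid := (lo + hi) / 2
      if (rem.getD mid (0, 0)).1 < x then bisectGo rem x fuel (mid + 1) hi
      else bisectGo rem x fuel lo mid
    else lo

def bisectL (rem : List (Int × Int)) (x : Int) : Nat := bisectGo rem x rem.length 0 rem.length

-- tuple comparison '(ref - v, idx) < (best[0], best[1])' from Source B (true when best is None)
def lowerBeats (best0 : Option (Int × Int × Nat)) (d idx : Int) : Bool :=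
  match best0 with
  | none => true
  | some q => decide (d < q.1) || (decide (d = q.1) && decide (idx < q.2.1))

-- one iteration of B's 'for ref in referenceHits' loop; bBest is the per-ref candidate
-- selection (binary search for the nearest remaining value on each side of ref)
def bBest (ref : Int) (rem : List (Int × Int)) : Option (Int × Int × Nat) :=
  let lo := bisectL rem ref
  let best0 : Option (Int × Int × Nat) :=       -- (diff, original index, position in rem)
    if lo < rem.length then
      let p := rem.getD lo (0, 0)
      if p.1 - ref ≤ 300 then some (p.1 - ref, p.2, lo) else none
    else none
  if 0 < lo then
    let v := (rem.getD (lo - 1) (0, 0)).1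
    let j := bisectL rem v
    let idx := (rem.getD j (0, 0)).2
    if decide (ref - v ≤ 300) && lowerBeats best0 (ref - v) idx then some (ref - v, idx, j)
    else best0
  else best0

def bStep (ref : Int) (st : List (Int × Int) × List Int × List Int) :
    List (Int × Int) × List Int × List Int :=
  match bBest ref st.1 with
  | some q => (st.1.eraseIdx q.2.2, st.2.1 ++ [(st.1.getD q.2.2 (0, 0)).1], st.2.2 ++ [ref])
  | none => st

def matchHits_alt (hits : List Int) (referenceHits : List Int) : List Int × List Int :=
  let rem0 := PySem.List.sorted2 ((PySem.List.enumerate hits).map (fun p => (p.2, p.1)))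
    Prod.fst Prod.snd
  let st := referenceHits.foldl (fun st ref => bStep ref st) (rem0, [], [])
  (st.2.1, st.2.2)

-- ===== PRECONDITION & SPEC =====
def Spec_matchHits (hits : List Int) (referenceHits : List Int) (out : List Int × List Int) : Prop := out = matchHits_alt hits referenceHits
instance (hits : List Int) (referenceHits : List Int) (out : List Int × List Int) : Decidable (Spec_matchHits hits referenceHits out) := by unfold Spec_matchHits; infer_instance

-- ===== CLAIM (what is proved, stated in full; the proofs are below) =====
def Claim_equal_matchHits : Prop := ∀ (hits : List Int) (referenceHits : List Int), Dom_matchHits hits referenceHits → Spec_matchHits hits referenceHits (matchHits hits referenceHits)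

-- ===== LEMMAS AND PROOFS =====

-- non-strict lexicographic order on (value, original index) pairs
def LexLe (a b : Int × Int) : Prop := a.1 < b.1 ∨ (a.1 = b.1 ∧ a.2 ≤ b.2)

-- 'a is the hit greedily chosen for ref from the remaining pairs S':
-- within the window, minimal (|value - ref|, original index) lexicographically
def Best (ref : Int) (S : List (Int × Int)) (a : Int × Int) : Prop :=
  a ∈ S ∧ |a.1 - ref| ≤ 300 ∧
    ∀ b ∈ S, |b.1 - ref| ≤ 300 →
      (|a.1 - ref| < |b.1 - ref| ∨ (|a.1 - ref| = |b.1 - ref| ∧ a.2 ≤ b.2))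

-- the invariant tying A's remaining hits hs to B's sorted remaining pairs S:
-- P is the ghost list of (value, original index) of A's remaining hits, in A's order
def HInv (hs : List Int) (S : List (Int × Int)) : Prop :=
  ∃ P : List (Int × Int),
    hs = P.map Prod.fst ∧ (P.map Prod.snd).Pairwise (· < ·) ∧ S.Perm P ∧ S.Pairwise LexLe

def HRel (st : List Int × List (Int × Int)) (st' : List (Int × Int) × List Int × List Int) : Prop :=
  HInv st.1 st'.1 ∧ st'.2.1 = st.2.map Prod.fst ∧ st'.2.2 = st.2.map Prod.snd

theorem best_unique {ref : Int} {S : List (Int × Int)} {a b : Int × Int}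
    (hn : (S.map Prod.snd).Nodup) (ha : Best ref S a) (hb : Best ref S b) : a = b := by
  obtain ⟨haS, haw, hamin⟩ := ha
  obtain ⟨hbS, hbw, hbmin⟩ := hb
  have h1 := hamin b hbS hbw
  have h2 := hbmin a haS haw
  have hsnd : a.2 = b.2 := by
    rcases h1 with h | ⟨h, h'⟩ <;> rcases h2 with g | ⟨g, g'⟩
    · linarith
    · linarith
    · linarith
    · exact le_antisymm h' g'
  obtain ⟨i, hi, hia⟩ := List.mem_iff_getElem.mp haS
  obtain ⟨j, hj, hjb⟩ := List.mem_iff_getElem.mp hbS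
  have hi' : i < (S.map Prod.snd).length := by simpa using hi
  have hj' : j < (S.map Prod.snd).length := by simpa using hj
  have hij : i = j := by
    have : (S.map Prod.snd)[i] = (S.map Prod.snd)[j] := by
      simp only [List.getElem_map, hia, hjb, hsnd]
    exact (hn.getElem_inj_iff).mp this
  subst hij
  rw [← hia, ← hjb]

theorem fst_mono {S : List (Int × Int)} (h : S.Pairwise LexLe) {p q : Nat}
    (hpq : p ≤ q) (hq : q < S.length) : S[p].1 ≤ S[q].1 := by
  rcases Nat.lt_or_ge p q with hlt | hge
  · have hp : p < S.length := lt_trans hlt hq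
    have := List.pairwise_iff_getElem.mp h p q hp hq hlt
    rcases this with h1 | ⟨h1, _⟩
    · exact le_of_lt h1
    · exact le_of_eq h1
  · have : p = q := le_antisymm hpq hge
    subst this; exact le_refl _

theorem lex_mono {S : List (Int × Int)} (h : S.Pairwise LexLe) {p q : Nat}
    (hpq : p ≤ q) (hq : q < S.length) (hfst : S[p].1 = S[q].1) : S[p].2 ≤ S[q].2 := by
  rcases Nat.lt_or_ge p q with hlt | hge
  · have hp : p < S.length := lt_trans hlt hq
    have := List.pairwise_iff_getElem.mp h p q hp hq hlt
    rcases this with h1 | ⟨_, h2⟩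
    · omega
    · exact h2
  · have : p = q := le_antisymm hpq hge
    subst this; exact le_refl _

theorem bisectGo_spec (S : List (Int × Int)) (x : Int) (hS : S.Pairwise LexLe) :
    ∀ (fuel lo hi : Nat), hi - lo ≤ fuel → hi ≤ S.length → lo ≤ hi →
    (∀ k (hk : k < S.length), k < lo → S[k].1 < x) →
    (∀ k (hk : k < S.length), hi ≤ k → x ≤ S[k].1) →
    lo ≤ bisectGo S x fuel lo hi ∧ bisectGo S x fuel lo hi ≤ hi ∧
      (∀ k (hk : k < S.length), k < bisectGo S x fuel lo hi → S[k].1 < x) ∧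
      (∀ k (hk : k < S.length), bisectGo S x fuel lo hi ≤ k → x ≤ S[k].1) := by
  intro fuel
  induction fuel with
  | zero =>
    intro lo hi hfuel hhi hlohi hbelow habove
    have hle : lo = hi := by omega
    simp only [bisectGo]
    exact ⟨le_refl _, hlohi, hbelow, fun k hk hge => habove k hk (by omega)⟩
  | succ fuel ih =>
    intro lo hi hfuel hhi hlohi hbelow habove
    by_cases hlh : lo < hi
    · have hmidlt : (lo + hi) / 2 < hi := by omega
      have hmidge : lo ≤ (lo + hi) / 2 := by omega
      have hmidn : (lo + hi) / 2 < S.length := lt_of_lt_of_le hmidlt hhi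
      simp only [bisectGo, if_pos hlh, List.getD_eq_getElem _ _ hmidn]
      by_cases hc : S[(lo + hi) / 2].1 < x
      · rw [if_pos hc]
        have hbelow' : ∀ k (hk : k < S.length), k < (lo + hi) / 2 + 1 → S[k].1 < x := by
          intro k hk hklt
          exact lt_of_le_of_lt (fst_mono hS (by omega) hmidn) hc
        have h1 := ih ((lo + hi) / 2 + 1) hi (by omega) hhi (by omega) hbelow' habove
        exact ⟨le_trans (by omega) h1.1, h1.2.1, h1.2.2.1, h1.2.2.2⟩
      · rw [if_neg hc]
        push Not at hc
        have habove' : ∀ k (hk : k < S.length), (lo + hi) / 2 ≤ k → x ≤ S[k].1 := by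
          intro k hk hkge
          exact le_trans hc (fst_mono hS hkge hk)
        have h1 := ih lo ((lo + hi) / 2) (by omega) (by omega) (by omega) hbelow habove'
        exact ⟨h1.1, le_trans h1.2.1 (by omega), h1.2.2.1, h1.2.2.2⟩
    · simp only [bisectGo, if_neg hlh]
      exact ⟨le_refl _, hlohi, hbelow, fun k hk hge => habove k hk (by omega)⟩

theorem bisectL_spec (S : List (Int × Int)) (x : Int) (hS : S.Pairwise LexLe) :
    bisectL S x ≤ S.length ∧
    (∀ k (hk : k < S.length), k < bisectL S x → S[k].1 < x) ∧
    (∀ k (hk : k < S.length), bisectL S x ≤ k → x ≤ S[k].1) := by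
  have h := bisectGo_spec S x hS S.length 0 S.length (by omega) (le_refl _) (by omega)
    (fun k hk h => absurd h (by omega)) (fun k hk h => absurd hk (by omega))
  exact ⟨h.2.1, h.2.2.1, h.2.2.2⟩

theorem erase_corr {S P : List (Int × Int)} (hperm : S.Perm P)
    {pos i : Nat} (hpos : pos < S.length) (hi : i < P.length) (heq : S[pos] = P[i]) :
    (S.eraseIdx pos).Perm (P.eraseIdx i) := by
  have h1 : (S[pos] :: S.eraseIdx pos).Perm S :=
    PySem.List.perm_cons_eraseIdx S (List.getElem?_eq_getElem hpos)
  have h2 : (P[i] :: P.eraseIdx i).Perm P :=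
    PySem.List.perm_cons_eraseIdx P (List.getElem?_eq_getElem hi)
  have h3 := (h1.trans hperm).trans h2.symm
  rw [heq] at h3
  exact h3.cons_inv

-- the comparison sorted2 inserts with, on (value, index) pairs (strict lexicographic order)
def beforeLex (a b : Int × Int) : Bool :=
  decide (a.1 < b.1) || (!decide (b.1 < a.1) && decide (a.2 < b.2))

theorem beforeLex_false_iff (a b : Int × Int) : (beforeLex b a = false) ↔ LexLe a b := by
  simp [beforeLex, LexLe]; omega

theorem beforeLex_asym {x y : Int × Int} (h : beforeLex x y = true) : beforeLex y x = false := by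
  simp [beforeLex] at *; omega

theorem beforeLex_trans1 {x y z : Int × Int} (h1 : beforeLex x y = true)
    (h2 : beforeLex z y = false) : beforeLex z x = false := by
  simp [beforeLex] at *; omega

theorem insertBy_pairwise (x : Int × Int) (ys : List (Int × Int))
    (h : ys.Pairwise fun a b => beforeLex b a = false) :
    (PySem.List.insertBy beforeLex x ys).Pairwise fun a b => beforeLex b a = false := by
  induction ys with
  | nil => simp [PySem.List.insertBy]
  | cons y ys ih =>
    rw [List.pairwise_cons] at h
    obtain ⟨hy, hys⟩ := h
    by_cases hxy : beforeLex x y = true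
    · rw [show PySem.List.insertBy beforeLex x (y :: ys) = x :: y :: ys from by
        simp [PySem.List.insertBy, hxy]]
      refine List.Pairwise.cons ?_ (List.Pairwise.cons hy hys)
      intro z hz
      rcases List.mem_cons.mp hz with rfl | hz
      · exact beforeLex_asym hxy
      · exact beforeLex_trans1 hxy (hy z hz)
    · rw [show PySem.List.insertBy beforeLex x (y :: ys) = y :: PySem.List.insertBy beforeLex x ys
        from by simp [PySem.List.insertBy, hxy]]
      refine List.Pairwise.cons ?_ (ih hys)
      intro z hz
      rcases (PySem.List.mem_insertBy _ _ _ _).mp hz with rfl | hz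
      · simpa using hxy
      · exact hy z hz

theorem sorted2_pairwise_lexle (xs : List (Int × Int)) :
    (PySem.List.sorted2 xs Prod.fst Prod.snd).Pairwise LexLe := by
  have key : ∀ (l acc : List (Int × Int)),
      acc.Pairwise (fun a b => beforeLex b a = false) →
      (l.foldl (fun acc x => PySem.List.insertBy beforeLex x acc) acc).Pairwise
        (fun a b => beforeLex b a = false) := by
    intro l
    induction l with
    | nil => intro acc h; exact h
    | cons z l ih => intro acc h; exact ih _ (insertBy_pairwise z acc h)
  have hdef : PySem.List.sorted2 xs Prod.fst Prod.snd =
      xs.foldl (fun acc x => PySem.List.insertBy beforeLex x acc) [] := rfl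
  rw [hdef]
  exact (key xs [] (by simp)).imp (fun h => (beforeLex_false_iff _ _).mp h)

theorem inv_init (hits : List Int) :
    HInv hits (PySem.List.sorted2 ((PySem.List.enumerate hits).map (fun p => (p.2, p.1)))
      Prod.fst Prod.snd) := by
  refine ⟨(PySem.List.enumerate hits).map (fun p => (p.2, p.1)), ?_, ?_, ?_, ?_⟩
  · simp only [List.map_map, Function.comp_def]
    exact (PySem.List.map_snd_enumerate hits 0).symm
  · simp only [List.map_map, Function.comp_def, List.pairwise_map]
    exact PySem.List.pairwise_lt_enumerate hits 0
  · exact PySem.List.sorted2_perm _ _ _ _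
  · exact sorted2_pairwise_lexle _

theorem aScan_spec (ref : Int) (hs : List Int) :
    (aScan ref hs = (none, none, none) ∧ ∀ k (hk : k < hs.length), ¬(|hs[k] - ref| ≤ 300)) ∨
    (∃ (i : Nat) (hi : i < hs.length),
      aScan ref hs = (some hs[i], some (i : Int), some |hs[i] - ref|) ∧
      |hs[i] - ref| ≤ 300 ∧
      ∀ k (hk : k < hs.length), |hs[k] - ref| ≤ 300 →
        (|hs[i] - ref| < |hs[k] - ref| ∨ (|hs[i] - ref| = |hs[k] - ref| ∧ i ≤ k))) := by
  induction hs using List.reverseRecOn with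
  | nil =>
    left
    refine ⟨rfl, ?_⟩
    intro k hk
    simp at hk
  | append_singleton hs x ih =>
    have hstep : aScan ref (hs ++ [x]) =
        if |x - ref| ≤ 300 ∧ ((aScan ref hs).1 = none ∨ |x - ref| < (aScan ref hs).2.2.getD 0)
        then (some x, some ((hs.length : Int)), some |x - ref|)
        else aScan ref hs := by
      simp [aScan, PySem.List.enumerate_append, PySem.List.enumerate_cons,
        PySem.List.enumerate_nil]
    have hlen : (hs ++ [x]).length = hs.length + 1 := by simp
    have hgetlast : (hs ++ [x])[hs.length]'(by simp) = x := List.getElem_concat_length rfl _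
    have hgetk : ∀ k (hk : k < hs.length), (hs ++ [x])[k]'(by simp; omega) = hs[k] := by
      intro k hk; exact List.getElem_append_left hk
    rcases ih with ⟨hnone, hout⟩ | ⟨i, hi, heq, hw, hmin⟩
    · have hstep2 : aScan ref (hs ++ [x]) =
          if |x - ref| ≤ 300 then (some x, some ((hs.length : Int)), some |x - ref|)
          else (none, none, none) := by
        rw [hstep, hnone]
        by_cases hx : |x - ref| ≤ 300 <;> simp [hx]
      by_cases hx : |x - ref| ≤ 300
      · right
        refine ⟨hs.length, by simp, ?_, ?_, ?_⟩
        · rw [hstep2, if_pos hx, hgetlast]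
        · rw [hgetlast]; exact hx
        · intro k hk hkw
          rcases Nat.lt_or_ge k hs.length with hklt | hkge
          · exfalso
            exact hout k hklt (by rwa [hgetk k hklt] at hkw)
          · have hkeq : k = hs.length := by rw [hlen] at hk; omega
            subst hkeq
            right; exact ⟨rfl, le_refl _⟩
      · left
        refine ⟨by rw [hstep2, if_neg hx], ?_⟩
        intro k hk
        rcases Nat.lt_or_ge k hs.length with hklt | hkge
        · rw [hgetk k hklt]; exact hout k hklt
        · have hkeq : k = hs.length := by rw [hlen] at hk; omega
          subst hkeq; rw [hgetlast]; exact hx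
    · have hilt : i < (hs ++ [x]).length := by rw [hlen]; omega
      have hstep2 : aScan ref (hs ++ [x]) =
          if |x - ref| ≤ 300 ∧ |x - ref| < |hs[i] - ref| then
            (some x, some ((hs.length : Int)), some |x - ref|)
          else (some hs[i], some (i : Int), some |hs[i] - ref|) := by
        rw [hstep, heq]
        by_cases h1 : |x - ref| ≤ 300 <;> by_cases h2 : |x - ref| < |hs[i] - ref| <;>
          simp [h1, h2]
      by_cases hrep : |x - ref| ≤ 300 ∧ |x - ref| < |hs[i] - ref|
      · right
        refine ⟨hs.length, by rw [hlen]; omega, ?_, ?_, ?_⟩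
        · rw [hstep2, if_pos hrep, hgetlast]
        · rw [hgetlast]; exact hrep.1
        · intro k hk hkw
          rcases Nat.lt_or_ge k hs.length with hklt | hkge
          · rw [hgetk k hklt] at hkw ⊢
            rw [hgetlast]
            left
            have h3 := hmin k hklt hkw
            rcases h3 with h3 | ⟨h3, _⟩ <;> linarith [hrep.2]
          · have hkeq : k = hs.length := by rw [hlen] at hk; omega
            subst hkeq
            right; exact ⟨rfl, le_refl _⟩
      · right
        refine ⟨i, hilt, ?_, ?_, ?_⟩
        · rw [hstep2, if_neg hrep, hgetk i hi]
        · rw [hgetk i hi]; exact hw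
        · intro k hk hkw
          rw [hgetk i hi]
          rcases Nat.lt_or_ge k hs.length with hklt | hkge
          · rw [hgetk k hklt] at hkw ⊢
            exact hmin k hklt hkw
          · have hkeq : k = hs.length := by rw [hlen] at hk; omega
            subst hkeq
            rw [hgetlast] at hkw ⊢
            have hnl : ¬ (|x - ref| < |hs[i] - ref|) := fun hlt => hrep ⟨hkw, hlt⟩
            rcases lt_or_eq_of_le (not_lt.mp hnl) with hc | hc
            · left; exact hc
            · right; exact ⟨hc, by omega⟩

theorem best_assemble (ref : Int) (S : List (Int × Int)) {pos : Nat} (hpos : pos < S.length)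
    (hw : |S[pos].1 - ref| ≤ 300)
    (hmin : ∀ k (hk : k < S.length), |S[k].1 - ref| ≤ 300 →
      (|S[pos].1 - ref| < |S[k].1 - ref| ∨
       (|S[pos].1 - ref| = |S[k].1 - ref| ∧ S[pos].2 ≤ S[k].2))) :
    Best ref S (S[pos]) := by
  refine ⟨List.getElem_mem _, hw, ?_⟩
  intro b hb hbw
  obtain ⟨k, hk, rfl⟩ := List.mem_iff_getElem.mp hb
  exact hmin k hk hbw

theorem upper_facts (ref : Int) (S : List (Int × Int)) (hS : S.Pairwise LexLe)
    (hlt : bisectL S ref < S.length) :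
    |S[bisectL S ref].1 - ref| = S[bisectL S ref].1 - ref ∧
    ∀ k (hk : k < S.length), bisectL S ref ≤ k → |S[k].1 - ref| ≤ 300 →
      (S[bisectL S ref].1 - ref < |S[k].1 - ref| ∨
       (S[bisectL S ref].1 - ref = |S[k].1 - ref| ∧ S[bisectL S ref].2 ≤ S[k].2)) := by
  obtain ⟨hlole, hbelow, habove⟩ := bisectL_spec S ref hS
  have h1 : ref ≤ S[bisectL S ref].1 := habove _ hlt (le_refl _)
  refine ⟨abs_of_nonneg (by omega), ?_⟩
  intro k hk hkge hkw
  have h2 : ref ≤ S[k].1 := habove _ hk hkge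
  have h3 : |S[k].1 - ref| = S[k].1 - ref := abs_of_nonneg (by omega)
  have h4 : S[bisectL S ref].1 ≤ S[k].1 := fst_mono hS hkge hk
  rcases lt_or_eq_of_le h4 with h5 | h5
  · left; omega
  · right
    exact ⟨by omega, lex_mono hS hkge hk h5⟩

theorem lower_facts (ref : Int) (S : List (Int × Int)) (hS : S.Pairwise LexLe)
    (h0 : 0 < bisectL S ref) (hlo1 : bisectL S ref - 1 < S.length) :
    ∃ hjlt : bisectL S (S[bisectL S ref - 1].1) < S.length,
      S[bisectL S (S[bisectL S ref - 1].1)].1 = S[bisectL S ref - 1].1 ∧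
      S[bisectL S ref - 1].1 < ref ∧
      ∀ k (hk : k < S.length), k < bisectL S ref → |S[k].1 - ref| ≤ 300 →
        (ref - S[bisectL S ref - 1].1 < |S[k].1 - ref| ∨
         (ref - S[bisectL S ref - 1].1 = |S[k].1 - ref| ∧
          S[bisectL S (S[bisectL S ref - 1].1)].2 ≤ S[k].2)) := by
  obtain ⟨hlole, hbelow, habove⟩ := bisectL_spec S ref hS
  have hvlt : S[bisectL S ref - 1].1 < ref := hbelow _ hlo1 (by omega)
  obtain ⟨hjle, hjbelow, hjabove⟩ := bisectL_spec S (S[bisectL S ref - 1].1) hS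
  have hj1 : bisectL S (S[bisectL S ref - 1].1) ≤ bisectL S ref - 1 := by
    by_contra hcon
    exact absurd (hjbelow (bisectL S ref - 1) hlo1 (by omega)) (lt_irrefl _)
  have hjlt : bisectL S (S[bisectL S ref - 1].1) < S.length := by omega
  have hjfst : S[bisectL S (S[bisectL S ref - 1].1)].1 = S[bisectL S ref - 1].1 :=
    le_antisymm (fst_mono hS hj1 hlo1) (hjabove _ hjlt (le_refl _))
  refine ⟨hjlt, hjfst, hvlt, ?_⟩
  intro k hk hklo hkw
  have h1 : S[k].1 < ref := hbelow _ hk hklo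
  have h2 : S[k].1 ≤ S[bisectL S ref - 1].1 := fst_mono hS (by omega) hlo1
  have h3 : |S[k].1 - ref| = ref - S[k].1 := by
    rw [abs_of_nonpos (by omega)]; ring
  rcases lt_or_eq_of_le h2 with h4 | h4
  · left; omega
  · right
    refine ⟨by omega, ?_⟩
    have hkj : bisectL S (S[bisectL S ref - 1].1) ≤ k := by
      by_contra hcon
      have := hjbelow k hk (by omega)
      omega
    exact lex_mono hS hkj hk (by rw [hjfst, h4])

theorem bBest_spec (ref : Int) (S : List (Int × Int)) (hS : S.Pairwise LexLe)
    (_hn : (S.map Prod.snd).Nodup) :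
    (bBest ref S = none ∧ ∀ b ∈ S, ¬(|b.1 - ref| ≤ 300)) ∨
    (∃ (pos : Nat) (h : pos < S.length),
      bBest ref S = some (|S[pos].1 - ref|, S[pos].2, pos) ∧ Best ref S S[pos]) := by
  obtain ⟨hlole, hbelow, habove⟩ := bisectL_spec S ref hS
  by_cases h0 : 0 < bisectL S ref
  · have hlo1 : bisectL S ref - 1 < S.length := by omega
    obtain ⟨hjlt, hjfst, hvlt, hlmin⟩ := lower_facts ref S hS h0 hlo1
    have habsl : |S[bisectL S (S[bisectL S ref - 1].1)].1 - ref| =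
        ref - S[bisectL S ref - 1].1 := by
      rw [hjfst, abs_of_nonpos (by omega)]; ring
    by_cases hlt : bisectL S ref < S.length
    · obtain ⟨habsu, humin⟩ := upper_facts ref S hS hlt
      by_cases hup : S[bisectL S ref].1 - ref ≤ 300
      · by_cases hdl : ref - S[bisectL S ref - 1].1 ≤ 300
        · by_cases hbeat : ref - S[bisectL S ref - 1].1 < S[bisectL S ref].1 - ref ∨
              (ref - S[bisectL S ref - 1].1 = S[bisectL S ref].1 - ref ∧
               S[bisectL S (S[bisectL S ref - 1].1)].2 < S[bisectL S ref].2)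
          · -- L1: lower candidate wins
            have hbF : lowerBeats (some (S[bisectL S ref].1 - ref, S[bisectL S ref].2,
                bisectL S ref)) (ref - S[bisectL S ref - 1].1)
                (S[bisectL S (S[bisectL S ref - 1].1)].2) = true := by
              simp only [lowerBeats, Bool.or_eq_true, Bool.and_eq_true, decide_eq_true_eq]
              tauto
            have hbb : bBest ref S = some (ref - S[bisectL S ref - 1].1,
                S[bisectL S (S[bisectL S ref - 1].1)].2,
                bisectL S (S[bisectL S ref - 1].1)) := by
              simp [bBest, hlt, h0, hup, hdl,                 List.getElem?_eq_getElem hlo1, List.getElem?_eq_getElem hjlt, hbF]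
            right
            refine ⟨bisectL S (S[bisectL S ref - 1].1), hjlt, by rw [hbb, habsl], ?_⟩
            refine best_assemble ref S hjlt (by rw [habsl]; exact hdl) ?_
            intro k hk hkw
            rw [habsl]
            rcases Nat.lt_or_ge k (bisectL S ref) with hklo | hkge
            · exact hlmin k hk hklo hkw
            · have h5 := humin k hk hkge hkw
              rcases hbeat with hb | ⟨hb1, hb2⟩
              · left
                rcases h5 with h5 | ⟨h5, _⟩ <;> linarith
              · rcases h5 with h5 | ⟨h5, h6⟩
                · left; linarith
                · right; exact ⟨by linarith, by omega⟩
          · -- L2: upper candidate kept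
            have hbF : lowerBeats (some (S[bisectL S ref].1 - ref, S[bisectL S ref].2,
                bisectL S ref)) (ref - S[bisectL S ref - 1].1)
                (S[bisectL S (S[bisectL S ref - 1].1)].2) = false := by
              simp only [lowerBeats, Bool.or_eq_false_iff, Bool.and_eq_false_iff,
                decide_eq_false_iff_not]
              push Not at hbeat
              constructor
              · exact not_lt.mpr hbeat.1
              · by_cases he : ref - S[bisectL S ref - 1].1 = S[bisectL S ref].1 - ref
                · right; exact not_lt.mpr (hbeat.2 he)
                · left; exact he
            have hbb : bBest ref S = some (S[bisectL S ref].1 - ref, S[bisectL S ref].2,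
                bisectL S ref) := by
              simp [bBest, hlt, h0, hup, hdl,                 List.getElem?_eq_getElem hlo1, List.getElem?_eq_getElem hjlt, hbF]
            right
            refine ⟨bisectL S ref, hlt, by rw [hbb, habsu], ?_⟩
            refine best_assemble ref S hlt (by rw [habsu]; exact hup) ?_
            intro k hk hkw
            rw [habsu]
            rcases Nat.lt_or_ge k (bisectL S ref) with hklo | hkge
            · have h5 := hlmin k hk hklo hkw
              push Not at hbeat
              have hble : S[bisectL S ref].1 - ref ≤ ref - S[bisectL S ref - 1].1 :=
                hbeat.1
              rcases lt_or_eq_of_le hble with h6 | h6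
              · left
                rcases h5 with h5 | ⟨h5, _⟩ <;> linarith
              · have h7 := hbeat.2 h6.symm
                rcases h5 with h5 | ⟨h5, h8⟩
                · left; linarith
                · right; exact ⟨by linarith, by omega⟩
            · exact humin k hk hkge hkw
        · -- L3: lower out of window, upper kept
          have hbb : bBest ref S = some (S[bisectL S ref].1 - ref, S[bisectL S ref].2,
              bisectL S ref) := by
            simp [bBest, hlt, h0, hup, hdl,               List.getElem?_eq_getElem hlo1]
          right
          refine ⟨bisectL S ref, hlt, by rw [hbb, habsu], ?_⟩
          refine best_assemble ref S hlt (by rw [habsu]; exact hup) ?_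
          intro k hk hkw
          rw [habsu]
          rcases Nat.lt_or_ge k (bisectL S ref) with hklo | hkge
          · exfalso
            have h5 := hlmin k hk hklo hkw
            rcases h5 with h5 | ⟨h5, _⟩ <;> omega
          · exact humin k hk hkge hkw
      · -- best0 = none (upper out of window)
        by_cases hdl : ref - S[bisectL S ref - 1].1 ≤ 300
        · -- L4: lower wins over empty
          have hbb : bBest ref S = some (ref - S[bisectL S ref - 1].1,
              S[bisectL S (S[bisectL S ref - 1].1)].2,
              bisectL S (S[bisectL S ref - 1].1)) := by
            simp [bBest, hlt, h0, hup, hdl, lowerBeats,               List.getElem?_eq_getElem hlo1, List.getElem?_eq_getElem hjlt]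
          right
          refine ⟨bisectL S (S[bisectL S ref - 1].1), hjlt, by rw [hbb, habsl], ?_⟩
          refine best_assemble ref S hjlt (by rw [habsl]; exact hdl) ?_
          intro k hk hkw
          rw [habsl]
          rcases Nat.lt_or_ge k (bisectL S ref) with hklo | hkge
          · exact hlmin k hk hklo hkw
          · exfalso
            have h2 : ref ≤ S[k].1 := habove _ hk hkge
            have h4 : S[bisectL S ref].1 ≤ S[k].1 := fst_mono hS hkge hk
            have h3 : |S[k].1 - ref| = S[k].1 - ref := abs_of_nonneg (by omega)
            omega
        · -- L5: nothing in window
          have hbb : bBest ref S = none := by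
            simp [bBest, hlt, h0, hup, hdl, lowerBeats,               List.getElem?_eq_getElem hlo1]
          left
          refine ⟨hbb, ?_⟩
          intro b hb hbw
          obtain ⟨k, hk, rfl⟩ := List.mem_iff_getElem.mp hb
          rcases Nat.lt_or_ge k (bisectL S ref) with hklo | hkge
          · have h5 := hlmin k hk hklo hbw
            rcases h5 with h5 | ⟨h5, _⟩ <;> omega
          · have h2 : ref ≤ S[k].1 := habove _ hk hkge
            have h4 : S[bisectL S ref].1 ≤ S[k].1 := fst_mono hS hkge hk
            have h3 : |S[k].1 - ref| = S[k].1 - ref := abs_of_nonneg (by omega)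
            omega
    · -- no upper side at all (bisectL = length)
      by_cases hdl : ref - S[bisectL S ref - 1].1 ≤ 300
      · -- L6: lower wins
        have hbb : bBest ref S = some (ref - S[bisectL S ref - 1].1,
            S[bisectL S (S[bisectL S ref - 1].1)].2,
            bisectL S (S[bisectL S ref - 1].1)) := by
          simp [bBest, hlt, h0, hdl, lowerBeats, List.getElem?_eq_getElem hlo1,
            List.getElem?_eq_getElem hjlt]
        right
        refine ⟨bisectL S (S[bisectL S ref - 1].1), hjlt, by rw [hbb, habsl], ?_⟩
        refine best_assemble ref S hjlt (by rw [habsl]; exact hdl) ?_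
        intro k hk hkw
        rw [habsl]
        exact hlmin k hk (by omega) hkw
      · -- L7: nothing in window
        have hbb : bBest ref S = none := by
          simp [bBest, hlt, h0, hdl, lowerBeats, List.getElem?_eq_getElem hlo1]
        left
        refine ⟨hbb, ?_⟩
        intro b hb hbw
        obtain ⟨k, hk, rfl⟩ := List.mem_iff_getElem.mp hb
        have h5 := hlmin k hk (by omega) hbw
        rcases h5 with h5 | ⟨h5, _⟩ <;> omega
  · -- no lower side (bisectL = 0)
    by_cases hlt : bisectL S ref < S.length
    · obtain ⟨habsu, humin⟩ := upper_facts ref S hS hlt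
      by_cases hup : S[bisectL S ref].1 - ref ≤ 300
      · -- L8: upper candidate
        have hbb : bBest ref S = some (S[bisectL S ref].1 - ref, S[bisectL S ref].2,
            bisectL S ref) := by
          simp [bBest, hlt, h0, hup]
        right
        refine ⟨bisectL S ref, hlt, by rw [hbb, habsu], ?_⟩
        refine best_assemble ref S hlt (by rw [habsu]; exact hup) ?_
        intro k hk hkw
        rw [habsu]
        exact humin k hk (by omega) hkw
      · -- L9: nothing in window
        have hbb : bBest ref S = none := by
          simp [bBest, hlt, h0, hup]
        left
        refine ⟨hbb, ?_⟩
        intro b hb hbw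
        obtain ⟨k, hk, rfl⟩ := List.mem_iff_getElem.mp hb
        have h2 : ref ≤ S[k].1 := habove _ hk (by omega)
        have h4 : S[bisectL S ref].1 ≤ S[k].1 := fst_mono hS (by omega) hk
        have h3 : |S[k].1 - ref| = S[k].1 - ref := abs_of_nonneg (by omega)
        omega
    · -- L10: empty list
      have hempty : S.length = 0 := by omega
      have hbb : bBest ref S = none := by
        simp [bBest, hlt, h0]
      left
      refine ⟨hbb, ?_⟩
      intro b hb hbw
      obtain ⟨k, hk, rfl⟩ := List.mem_iff_getElem.mp hb
      omega

theorem snd_mono {P : List (Int × Int)} (h : (P.map Prod.snd).Pairwise (· < ·)) {i k : Nat}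
    (hik : i ≤ k) (hk : k < P.length) : (P[i]'(by omega)).2 ≤ P[k].2 := by
  rcases Nat.lt_or_ge i k with hlt | hge
  · have hi : i < P.length := by omega
    have := List.pairwise_iff_getElem.mp h i k (by simpa using hi) (by simpa using hk)
      hlt
    simp only [List.getElem_map] at this
    exact le_of_lt this
  · have : i = k := by omega
    subst this; exact le_refl _

theorem step_rel (ref : Int) (st : List Int × List (Int × Int))
    (st' : List (Int × Int) × List Int × List Int) (h : HRel st st') :
    HRel (aStep ref st) (bStep ref st') := by
  obtain ⟨hs, tr⟩ := st
  obtain ⟨S, oh, orr⟩ := st'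
  obtain ⟨⟨P, hmap, hsnd, hperm, hsort⟩, h1, h2⟩ := h
  simp only at hmap hsnd hperm hsort h1 h2
  have hlen : hs.length = P.length := by rw [hmap]; simp
  have hsk : ∀ k (hk : k < P.length), hs[k]'(by omega) = (P[k]).1 := by
    intro k hk
    subst hmap; simp
  have hPn : (P.map Prod.snd).Nodup := hsnd.imp (fun h => ne_of_lt h)
  have hSn : (S.map Prod.snd).Nodup := ((hperm.map Prod.snd).nodup_iff).mpr hPn
  rcases aScan_spec ref hs with ⟨hnone, hnoelt⟩ | ⟨i, hi, heq, hw, hmin⟩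
  · have hnoS : ∀ b ∈ S, ¬(|b.1 - ref| ≤ 300) := by
      intro b hb
      obtain ⟨k, hk, rfl⟩ := List.mem_iff_getElem.mp ((hperm.mem_iff).mp hb)
      have hkh : k < hs.length := by omega
      have := hnoelt k hkh
      rwa [hsk k hk] at this
    have hbb : bBest ref S = none := by
      rcases bBest_spec ref S hsort hSn with ⟨hb, _⟩ | ⟨pos, hpos, _, hbest⟩
      · exact hb
      · exact absurd hbest.2.1 (hnoS _ hbest.1)
    have hA : aStep ref (hs, tr) = (hs, tr) := by
      simp [aStep, hnone]
    have hB : bStep ref (S, oh, orr) = (S, oh, orr) := by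
      simp [bStep, hbb]
    rw [hA, hB]
    exact ⟨⟨P, hmap, hsnd, hperm, hsort⟩, h1, h2⟩
  · have hiP : i < P.length := by omega
    have hBestP : Best ref P (P[i]) := by
      refine ⟨List.getElem_mem _, by rw [← hsk i hiP]; exact hw, ?_⟩
      intro b hb hbw
      obtain ⟨k, hk, rfl⟩ := List.mem_iff_getElem.mp hb
      have hkh : k < hs.length := by omega
      have h3 := hmin k hkh (by rw [hsk k hk]; exact hbw)
      rw [hsk i hiP, hsk k hk] at h3
      rcases h3 with h3 | ⟨h3, h3'⟩
      · left; exact h3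
      · right; exact ⟨h3, snd_mono hsnd h3' hk⟩
    have hBestS : Best ref S (P[i]) := by
      obtain ⟨hm, hw', hmin'⟩ := hBestP
      exact ⟨(hperm.mem_iff).mpr hm, hw', fun b hb hbw => hmin' b ((hperm.mem_iff).mp hb) hbw⟩
    rcases bBest_spec ref S hsort hSn with ⟨hb, hnoS⟩ | ⟨pos, hpos, hbb, hbest⟩
    · exact absurd hBestS.2.1 (hnoS _ hBestS.1)
    have heqel : S[pos] = P[i] := best_unique hSn hbest hBestS
    have hA : aStep ref (hs, tr) = (hs.eraseIdx i, tr ++ [(hs[i], ref)]) := by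
      simp [aStep, heq, PySem.List.pop?_natCast hs i hi]
    have hB : bStep ref (S, oh, orr) = (S.eraseIdx pos, oh ++ [(S[pos]).1], orr ++ [ref]) := by
      simp [bStep, hbb, List.getElem?_eq_getElem hpos]
    rw [hA, hB]
    refine ⟨⟨P.eraseIdx i, ?_, ?_, ?_, ?_⟩, ?_, ?_⟩
    · show hs.eraseIdx i = (P.eraseIdx i).map Prod.fst
      rw [hmap, List.eraseIdx_map]
    · rw [← List.eraseIdx_map]
      exact List.Pairwise.sublist (List.eraseIdx_sublist _ _) hsnd
    · exact erase_corr hperm hpos hiP heqel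
    · exact List.Pairwise.sublist (List.eraseIdx_sublist _ _) hsort
    · show oh ++ [S[pos].1] = (tr ++ [(hs[i], ref)]).map Prod.fst
      simp only [List.map_append, List.map_cons, List.map_nil]
      rw [h1, heqel, hsk i hiP]
    · show orr ++ [ref] = (tr ++ [(hs[i], ref)]).map Prod.snd
      simp only [List.map_append, List.map_cons, List.map_nil]
      rw [h2]

-- ===== VERDICT (by name: the statement is the Claim_ definition above) =====
theorem matchHits_spec : Claim_equal_matchHits := by
  intro hits referenceHits _
  unfold Spec_matchHits matchHits matchHits_alt
  have main : ∀ (refs : List Int) st st', HRel st st' →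
      HRel (refs.foldl (fun st ref => aStep ref st) st)
          (refs.foldl (fun st ref => bStep ref st) st') := by
    intro refs
    induction refs with
    | nil => intro st st' h; exact h
    | cons r rs ih => intro st st' h; exact ih _ _ (step_rel r st st' h)
  have h0 : HRel (hits, ([] : List (Int × Int)))
      (PySem.List.sorted2 ((PySem.List.enumerate hits).map (fun p => (p.2, p.1)))
        Prod.fst Prod.snd, [], []) := ⟨inv_init hits, rfl, rfl⟩
  have hfin := main referenceHits _ _ h0
  obtain ⟨-, h1, h2⟩ := hfin
  by_cases hemp : (referenceHits.foldl (fun st ref => aStep ref st) (hits, ([] : List (Int × Int)))).2 = []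
  · simp [hemp] at h1 h2
    simp [hemp, h1, h2]
  · simp [hemp, h1, h2]
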